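-- pv_equiv track=rewrite | github.com/Sam-Polo/polymarket-bot | botv3.py | direction_relation
-- ===== SOURCE A (Python) =====
-- from typing import Any, Dict, List, Optional, Set, Tuple
--
-- OPPOSITE_ACTIONS = {
--     "approve": {"reject", "delay"},
--     "reject": {"approve"},
--     "delay": {"approve", "launch"},
--     "cut": {"hike"},
--     "hike": {"cut"},
--     "win": {"lose"},
--     "lose": {"win"},
--     "launch": {"delay", "reject"},
--     "recession": set(),
--     "inflation_up": {"inflation_down"},
--     "inflation_down": {"inflation_up"},
-- }
--
-- def direction_relation(news_actions: Set[str], market_actions: Set[str]) -> str: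
--     if not news_actions or not market_actions:
--         return "none"
--     if news_actions & market_actions:
--         return "same"
--     for action in news_actions:
--         opposites = OPPOSITE_ACTIONS.get(action, set())
--         if market_actions & opposites:
--             return "opposite"
--     return "none"
-- ===== SOURCE B (Python) =====
-- OPPOSITE_ACTIONS = {
--     "approve": {"reject", "delay"},
--     "reject": {"approve"},
--     "delay": {"approve", "launch"},
--     "cut": {"hike"},
--     "hike": {"cut"},
--     "win": {"lose"},
--     "lose": {"win"},
--     "launch": {"delay", "reject"},
--     "recession": set(),
--     "inflation_up": {"inflation_down"},
--     "inflation_down": {"inflation_up"},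
-- }
--
-- # Assign each known action a bit; encode each action's opposite-set as an integer mask.
-- _ACTIONS = ["approve", "reject", "delay", "cut", "hike", "win", "lose",
--             "launch", "recession", "inflation_up", "inflation_down"]
-- _BIT = {a: 1 << i for i, a in enumerate(_ACTIONS)}
-- _OPP_MASK = {a: sum(_BIT[b] for b in s) for a, s in OPPOSITE_ACTIONS.items()}
--
-- def direction_relation(news_actions, market_actions):
--     if not news_actions or not market_actions:
--         return "none"
--     if news_actions & market_actions:
--         return "same"
--     want = 0
--     for a in news_actions:
--         want |= _OPP_MASK.get(a, 0)
--     have = 0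
--     for m in market_actions:
--         have |= _BIT.get(m, 0)
--     return "opposite" if want & have else "none"
-- ===== Notes on version B (the rewrite author's own statement) =====
-- stated objective: alternative
-- what changed: B encodes the fixed action vocabulary as bit positions and each opposite-set as an integer bitmask, ORs the news-side opposite masks and the market-side action bits into two integers, and decides 'opposite' by a single bitwise AND instead of A's per-action set-intersection loop with early return.
import Mathlib
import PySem

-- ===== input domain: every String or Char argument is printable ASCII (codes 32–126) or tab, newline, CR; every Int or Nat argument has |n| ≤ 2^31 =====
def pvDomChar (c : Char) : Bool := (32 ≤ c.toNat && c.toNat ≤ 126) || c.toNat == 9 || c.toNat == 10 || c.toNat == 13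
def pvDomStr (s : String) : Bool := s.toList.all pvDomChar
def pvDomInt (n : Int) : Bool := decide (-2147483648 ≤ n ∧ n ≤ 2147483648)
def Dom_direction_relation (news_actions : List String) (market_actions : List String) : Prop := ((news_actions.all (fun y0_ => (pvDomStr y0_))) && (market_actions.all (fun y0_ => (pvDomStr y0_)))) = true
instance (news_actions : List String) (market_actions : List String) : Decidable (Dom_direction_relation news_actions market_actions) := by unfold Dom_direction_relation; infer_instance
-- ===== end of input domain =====

-- B encodes the fixed action vocabulary as bit positions and opposite-sets as integer
-- bitmasks, deciding "opposite" by one bitwise AND of two OR-accumulated masks instead of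
-- A's per-action set-intersection loop (objective: alternative).


-- ===== PORT A =====
-- OPPOSITE_ACTIONS: the module-level dict (values are Python sets, given as their distinct elements)
def oppositeActions : PySem.Dict String (List String) := PySem.Dict.ofList
  [("approve", ["reject", "delay"]), ("reject", ["approve"]),
   ("delay", ["approve", "launch"]), ("cut", ["hike"]), ("hike", ["cut"]),
   ("win", ["lose"]), ("lose", ["win"]), ("launch", ["delay", "reject"]),
   ("recession", []), ("inflation_up", ["inflation_down"]),
   ("inflation_down", ["inflation_up"])]

-- A's 'for action in news_actions: … return "opposite"' loop (early return)
def directionLoop (market_actions : List String) : List String → String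
  | [] => "none"
  | action :: rest =>
    let opposites := PySem.Dict.getD oppositeActions action []
    if PySem.Set.inter market_actions opposites ≠ [] then "opposite"
    else directionLoop market_actions rest

def direction_relation (news_actions : List String) (market_actions : List String) : String :=
  if news_actions = [] ∨ market_actions = [] then "none"
  else if PySem.Set.inter news_actions market_actions ≠ [] then "same"
  else directionLoop market_actions news_actions

-- ===== PORT B =====
-- _BIT = {a: 1 << i for i, a in enumerate(_ACTIONS)}  (module-level constant, values written out)
def bitDict : PySem.Dict String Nat := PySem.Dict.ofList
  [("approve", 1), ("reject", 2), ("delay", 4), ("cut", 8), ("hike", 16),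
   ("win", 32), ("lose", 64), ("launch", 128), ("recession", 256),
   ("inflation_up", 512), ("inflation_down", 1024)]

-- _OPP_MASK = {a: sum(_BIT[b] for b in s) for a, s in OPPOSITE_ACTIONS.items()}  (values written out)
def oppMaskDict : PySem.Dict String Nat := PySem.Dict.ofList
  [("approve", 6), ("reject", 1), ("delay", 129), ("cut", 16), ("hike", 8),
   ("win", 64), ("lose", 32), ("launch", 6), ("recession", 0),
   ("inflation_up", 1024), ("inflation_down", 512)]

def direction_relation_alt (news_actions : List String) (market_actions : List String) : String :=
  if news_actions = [] ∨ market_actions = [] then "none"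
  else if PySem.Set.inter news_actions market_actions ≠ [] then "same"
  else
    -- want = 0; for a in news_actions: want |= _OPP_MASK.get(a, 0)
    let want := news_actions.foldl (fun acc a => acc ||| PySem.Dict.getD oppMaskDict a 0) 0
    -- have = 0; for m in market_actions: have |= _BIT.get(m, 0)
    let haveM := market_actions.foldl (fun acc m => acc ||| PySem.Dict.getD bitDict m 0) 0
    if want &&& haveM ≠ 0 then "opposite" else "none"

-- ===== PRECONDITION & SPEC =====
def Spec_direction_relation (news_actions : List String) (market_actions : List String) (out : String) : Prop := out = direction_relation_alt news_actions market_actions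
instance (news_actions : List String) (market_actions : List String) (out : String) : Decidable (Spec_direction_relation news_actions market_actions out) := by unfold Spec_direction_relation; infer_instance

-- ===== CLAIM (what is proved, stated in full; the proofs are below) =====
def Claim_equal_direction_relation : Prop := ∀ (news_actions : List String) (market_actions : List String), Dom_direction_relation news_actions market_actions → Spec_direction_relation news_actions market_actions (direction_relation news_actions market_actions)

-- ===== LEMMAS AND PROOFS =====

-- the 11 known action strings (keys of all three dicts)
def knownActions : List String :=
  ["approve", "reject", "delay", "cut", "hike", "win", "lose", "launch",
   "recession", "inflation_up", "inflation_down"]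

-- an intersection is nonempty iff the two lists share an element
theorem inter_ne_nil_iff (s t : List String) :
    PySem.Set.inter s t ≠ [] ↔ ∃ x, x ∈ s ∧ x ∈ t := by
  rw [Ne, List.eq_nil_iff_forall_not_mem]
  push Not
  simp [PySem.Set.mem_inter]

-- lookups on unknown strings give the defaults
theorem getD_unknown (a : String) (ha : a ∉ knownActions) :
    PySem.Dict.getD oppMaskDict a 0 = 0 ∧ PySem.Dict.getD bitDict a 0 = 0 ∧
      PySem.Dict.getD oppositeActions a [] = [] := by
  have hm : oppMaskDict.get? a = none := by
    rw [PySem.Dict.get?_eq_none_iff_not_mem_keys,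
      show oppMaskDict.keys = knownActions from by decide]
    exact ha
  have hb : bitDict.get? a = none := by
    rw [PySem.Dict.get?_eq_none_iff_not_mem_keys,
      show bitDict.keys = knownActions from by decide]
    exact ha
  have ho : oppositeActions.get? a = none := by
    rw [PySem.Dict.get?_eq_none_iff_not_mem_keys,
      show oppositeActions.keys = knownActions from by decide]
    exact ha
  exact ⟨by rw [PySem.Dict.getD_eq_get?_getD, hm]; rfl,
         by rw [PySem.Dict.getD_eq_get?_getD, hb]; rfl,
         by rw [PySem.Dict.getD_eq_get?_getD, ho]; rfl⟩

-- a known action's opposites are themselves known actions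
theorem opposites_subset_known (a x : String) (ha : a ∈ knownActions)
    (hx : x ∈ PySem.Dict.getD oppositeActions a []) : x ∈ knownActions := by
  simp only [knownActions, List.mem_cons, List.not_mem_nil, or_false] at ha ⊢
  rcases ha with rfl | rfl | rfl | rfl | rfl | rfl | rfl | rfl | rfl | rfl | rfl <;>
    simp only [show PySem.Dict.getD oppositeActions "approve" [] = ["reject", "delay"] from by decide,
      show PySem.Dict.getD oppositeActions "reject" [] = ["approve"] from by decide,
      show PySem.Dict.getD oppositeActions "delay" [] = ["approve", "launch"] from by decide,
      show PySem.Dict.getD oppositeActions "cut" [] = ["hike"] from by decide,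
      show PySem.Dict.getD oppositeActions "hike" [] = ["cut"] from by decide,
      show PySem.Dict.getD oppositeActions "win" [] = ["lose"] from by decide,
      show PySem.Dict.getD oppositeActions "lose" [] = ["win"] from by decide,
      show PySem.Dict.getD oppositeActions "launch" [] = ["delay", "reject"] from by decide,
      show PySem.Dict.getD oppositeActions "recession" [] = ([] : List String) from by decide,
      show PySem.Dict.getD oppositeActions "inflation_up" [] = ["inflation_down"] from by decide,
      show PySem.Dict.getD oppositeActions "inflation_down" [] = ["inflation_up"] from by decide,
      List.mem_cons, List.not_mem_nil, or_false] at hx <;> tauto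

-- the bitmask pairing is exact: the AND of a's opposite-mask and x's bit is nonzero
-- iff x is in a's opposite set
theorem pair_iff (a x : String) :
    PySem.Dict.getD oppMaskDict a 0 &&& PySem.Dict.getD bitDict x 0 ≠ 0 ↔
      x ∈ PySem.Dict.getD oppositeActions a [] := by
  by_cases ha : a ∈ knownActions
  · by_cases hx : x ∈ knownActions
    · revert ha hx
      simp only [knownActions, List.mem_cons, List.not_mem_nil, or_false]
      rintro (rfl | rfl | rfl | rfl | rfl | rfl | rfl | rfl | rfl | rfl | rfl)
        (rfl | rfl | rfl | rfl | rfl | rfl | rfl | rfl | rfl | rfl | rfl) <;> decide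
    · rw [(getD_unknown x hx).2.1, Nat.and_zero]
      simp only [ne_eq, not_true_eq_false, false_iff]
      exact fun hmem => hx (opposites_subset_known a x ha hmem)
  · rw [(getD_unknown a ha).1, Nat.zero_and, (getD_unknown a ha).2.2]
    simp

-- a natural number is nonzero iff some bit is set
theorem ne_zero_iff_testBit (n : Nat) : n ≠ 0 ↔ ∃ i, n.testBit i = true := by
  constructor
  · intro h
    by_contra hc
    push Not at hc
    exact h (Nat.zero_of_testBit_eq_false (by simpa using hc))
  · rintro ⟨i, hi⟩ rfl
    simp at hi

-- bits of an OR-fold over a list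
theorem testBit_foldl_or (f : String → Nat) (l : List String) (acc : Nat) (i : Nat) :
    (l.foldl (fun acc a => acc ||| f a) acc).testBit i = true ↔
      acc.testBit i = true ∨ ∃ a ∈ l, (f a).testBit i = true := by
  induction l generalizing acc with
  | nil => simp
  | cons b rest ih =>
    simp only [List.foldl_cons, ih, Nat.testBit_or, Bool.or_eq_true, List.mem_cons]
    constructor
    · rintro ((h | h) | ⟨c, hc, h⟩)
      · exact Or.inl h
      · exact Or.inr ⟨b, Or.inl rfl, h⟩
      · exact Or.inr ⟨c, Or.inr hc, h⟩
    · rintro (h | ⟨c, (rfl | hc), h⟩)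
      · exact Or.inl (Or.inl h)
      · exact Or.inl (Or.inr h)
      · exact Or.inr ⟨c, hc, h⟩

-- B's AND-of-ORs test equals "some news action has some market action among its opposites"
theorem mask_test_iff (ns ms : List String) :
    (ns.foldl (fun acc a => acc ||| PySem.Dict.getD oppMaskDict a 0) 0) &&&
      (ms.foldl (fun acc m => acc ||| PySem.Dict.getD bitDict m 0) 0) ≠ 0 ↔
      ∃ a ∈ ns, ∃ x, x ∈ ms ∧ x ∈ PySem.Dict.getD oppositeActions a [] := by
  rw [ne_zero_iff_testBit]
  constructor
  · rintro ⟨i, hi⟩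
    rw [Nat.testBit_and, Bool.and_eq_true] at hi
    obtain ⟨hw, hh⟩ := hi
    rcases (testBit_foldl_or _ ns 0 i).1 hw with h0 | ⟨a, ha, hfa⟩
    · simp at h0
    rcases (testBit_foldl_or _ ms 0 i).1 hh with h0 | ⟨x, hx, hfx⟩
    · simp at h0
    refine ⟨a, ha, x, hx, (pair_iff a x).1 ?_⟩
    rw [ne_zero_iff_testBit]
    exact ⟨i, by rw [Nat.testBit_and, hfa, hfx]; rfl⟩
  · rintro ⟨a, ha, x, hx, hop⟩
    obtain ⟨i, hi⟩ := (ne_zero_iff_testBit _).1 ((pair_iff a x).2 hop)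
    rw [Nat.testBit_and, Bool.and_eq_true] at hi
    refine ⟨i, ?_⟩
    rw [Nat.testBit_and, Bool.and_eq_true]
    exact ⟨(testBit_foldl_or _ ns 0 i).2 (Or.inr ⟨a, ha, hi.1⟩),
           (testBit_foldl_or _ ms 0 i).2 (Or.inr ⟨x, hx, hi.2⟩)⟩

-- A's loop answers "opposite" exactly when some action's opposites meet the market set
theorem directionLoop_eq (m : List String) (ns : List String) :
    directionLoop m ns =
      if ∃ a ∈ ns, ∃ x, x ∈ m ∧ x ∈ PySem.Dict.getD oppositeActions a [] then "opposite"
      else "none" := by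
  induction ns with
  | nil => simp [directionLoop]
  | cons a rest ih =>
    simp only [directionLoop, ih, inter_ne_nil_iff]
    by_cases h : ∃ x, x ∈ m ∧ x ∈ PySem.Dict.getD oppositeActions a []
    · simp [h]
    · simp [h]

-- ===== VERDICT (by name: the statement is the Claim_ definition above) =====
theorem direction_relation_spec : Claim_equal_direction_relation := by
  intro ns ms _
  unfold Spec_direction_relation direction_relation direction_relation_alt
  split_ifs with h1 h2
  · rfl
  · rfl
  · rw [directionLoop_eq]
    by_cases hp : ∃ a ∈ ns, ∃ x, x ∈ ms ∧ x ∈ PySem.Dict.getD oppositeActions a []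
    · rw [if_pos hp, if_pos ((mask_test_iff ns ms).2 hp)]
    · rw [if_neg hp, if_neg (fun h => hp ((mask_test_iff ns ms).1 h))]
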